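-- pv_equiv track=rewrite | github.com/midnightbot/leetcode_solutions | solution_set1/697. Degree of an Array.py | lens
-- ===== SOURCE A (Python) =====
-- def lens(nums,this):
--     f = 0
--     l = 0
--     for x in range(len(nums)):
--         if nums[x] == this:
--             f = x
--             break
--
--     for x in range(len(nums)-1,-1,-1):
--         if nums[x] == this:
--             l = x
--             break
--
--     return (l-f)+1
-- ===== SOURCE B (Python) =====
-- def lens(nums, this):
--     idx = [i for i, v in enumerate(nums) if v == this]
--     return idx[-1] - idx[0] + 1 if idx else 1
-- ===== Notes on version B (the rewrite author's own statement) =====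
-- stated objective: simpler
-- what changed: Replaces A's two break-terminated index scans (forward and backward) by one pass that collects all occurrence indices and computes the span from the endpoints of that list, with an explicit 1 for the absent-value case.
import Mathlib
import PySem

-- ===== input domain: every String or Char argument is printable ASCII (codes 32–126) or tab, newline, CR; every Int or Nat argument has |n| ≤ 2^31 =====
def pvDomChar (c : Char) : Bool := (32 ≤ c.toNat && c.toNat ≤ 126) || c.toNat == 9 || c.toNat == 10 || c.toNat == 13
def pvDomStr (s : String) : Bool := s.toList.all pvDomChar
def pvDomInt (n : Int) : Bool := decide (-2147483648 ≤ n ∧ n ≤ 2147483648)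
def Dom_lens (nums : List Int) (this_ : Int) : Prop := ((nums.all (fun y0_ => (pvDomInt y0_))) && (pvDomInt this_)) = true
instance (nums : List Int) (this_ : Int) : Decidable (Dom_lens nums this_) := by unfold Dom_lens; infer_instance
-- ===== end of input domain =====

-- B replaces A's two break-terminated index scans by one pass collecting all occurrence
-- indices and taking the span from that list's endpoints (objective: simpler).


-- ===== PORT A =====
-- the break-terminated loop 'for x in R: if nums[x] == this: acc = x; break' with acc's
-- initial value 0; both of A's ranges produce only in-range indices, so (pyGet? …).getD 0
-- is exact where A's nums[x] is evaluated
def lensScan (nums : List Int) (t : Int) : List Int → Int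
  | [] => 0
  | x :: rest =>
    if (PySem.List.pyGet? nums x).getD 0 == t then x else lensScan nums t rest

def lens (nums : List Int) (this_ : Int) : Int :=
  let f := lensScan nums this_ (PySem.List.pyRange 0 (nums.length : Int) 1)
  let l := lensScan nums this_ (PySem.List.pyRange ((nums.length : Int) - 1) (-1) (-1))
  (l - f) + 1

-- ===== PORT B =====
-- idx = [i for i, v in enumerate(nums) if v == this]  (zipIdx pairs are (value, index));
-- return idx[-1] - idx[0] + 1 if idx else 1
def lens_alt (nums : List Int) (this_ : Int) : Int :=
  let idx := ((nums.zipIdx).filter (fun p => p.1 == this_)).map (fun p => ((p.2 : Nat) : Int))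
  match idx with
  | [] => 1
  | h :: t => (h :: t).getLast (by simp) - h + 1

-- ===== PRECONDITION & SPEC =====
def Spec_lens (nums : List Int) (this_ : Int) (out : Int) : Prop := out = lens_alt nums this_
instance (nums : List Int) (this_ : Int) (out : Int) : Decidable (Spec_lens nums this_ out) := by unfold Spec_lens; infer_instance

-- ===== CLAIM (what is proved, stated in full; the proofs are below) =====
def Claim_equal_lens : Prop := ∀ (nums : List Int) (this_ : Int), Dom_lens nums this_ → Spec_lens nums this_ (lens nums this_)

-- ===== LEMMAS AND PROOFS =====

-- the occurrence indices of t in a list, front to back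
def idxsOf (t : Int) : List Int → List Nat
  | [] => []
  | a :: l => if a == t then 0 :: (idxsOf t l).map (· + 1) else (idxsOf t l).map (· + 1)

-- A's break loop returns the first index of the scanned range that matches, default 0
theorem lensScan_eq_headD (nums : List Int) (t : Int) (L : List Int) :
    lensScan nums t L = (L.filter (fun x => (PySem.List.pyGet? nums x).getD 0 == t)).headD 0 := by
  induction L with
  | nil => rfl
  | cons x rest ih =>
    by_cases h : ((PySem.List.pyGet? nums x).getD 0 == t) = true <;>
      simp [lensScan, h, ih]

theorem range_filter_eq_idxsOf (nums : List Int) (t : Int) :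
    (List.range nums.length).filter (fun i => (nums.getD i 0 == t)) = idxsOf t nums := by
  induction nums with
  | nil => rfl
  | cons a l ih =>
    rw [show (a :: l).length = l.length + 1 from rfl, List.range_succ_eq_map]
    by_cases h : (a == t) = true <;>
      simp [h, idxsOf, List.filter_map, ← ih, Function.comp_def, Nat.succ_eq_add_one]

-- B's comprehension produces exactly the occurrence indices (offset by the zipIdx start)
theorem zipIdx_filter_eq_idxsOf (t : Int) (l : List Int) : ∀ (k : Nat),
    ((l.zipIdx k).filter (fun p => p.1 == t)).map (fun p => ((p.2 : Nat) : Int)) =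
      (idxsOf t l).map (fun i : Nat => ((i + k : Nat) : Int)) := by
  induction l with
  | nil => intro k; rfl
  | cons a l ih =>
    intro k
    by_cases h : (a == t) = true <;>
      simp [h, idxsOf, ih (k + 1), List.map_map, Function.comp_def] <;>
      exact fun a _ => by omega

theorem pyRange_desc_map (n : Nat) :
    PySem.List.pyRange ((n : Int) - 1) (-1) (-1) =
      (List.range n).map (fun k : Nat => ((n : Int) - 1 - (k : Int))) := by
  cases n with
  | zero => rfl
  | succ m =>
    simp only [PySem.List.pyRange]
    norm_num
    rw [if_pos (by omega : (-1 : Int) < (m : Int))]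
    apply List.map_congr_left
    intro k _
    ring

-- Python's range(n-1, -1, -1) is the reverse of range(n)
theorem pyRange_desc (n : Nat) :
    PySem.List.pyRange ((n : Int) - 1) (-1) (-1) =
      ((List.range n).map (fun k : Nat => (k : Int))).reverse := by
  rw [pyRange_desc_map]
  apply List.ext_getElem
  · simp
  · intro i h1 h2
    simp at h1
    simp [List.getElem_reverse]
    omega

theorem headD_reverse (F : List Int) : F.reverse.headD 0 = F.getLastD 0 := by
  cases F using List.reverseRecOn <;> simp

-- filtering the cast range by A's loop test gives the occurrence indices
theorem base_filter (nums : List Int) (this_ : Int) :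
    ((List.range nums.length).map (fun k : Nat => (k : Int))).filter
        (fun x => ((PySem.List.pyGet? nums x).getD 0 == this_)) =
      (idxsOf this_ nums).map (fun i : Nat => (i : Int)) := by
  rw [List.filter_map]
  have hpred : ∀ i : Nat, ((PySem.List.pyGet? nums ((i : Nat) : Int)).getD 0 == this_) =
      (nums.getD i 0 == this_) := by
    intro i
    rw [PySem.List.pyGet?_natCast, List.getD_eq_getElem?_getD]
  have : (List.range nums.length).filter
      ((fun x => ((PySem.List.pyGet? nums x).getD 0 == this_)) ∘ (fun k : Nat => (k : Int))) =
      idxsOf this_ nums := by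
    rw [show ((fun x => ((PySem.List.pyGet? nums x).getD 0 == this_)) ∘ (fun k : Nat => (k : Int))) =
      (fun i : Nat => (nums.getD i 0 == this_)) from funext hpred, range_filter_eq_idxsOf]
  rw [this]

-- ===== VERDICT (by name: the statement is the Claim_ definition above) =====
theorem lens_spec : Claim_equal_lens := by
  intro nums this_ _
  show lens nums this_ = lens_alt nums this_
  have hf : lensScan nums this_ (PySem.List.pyRange 0 (nums.length : Int) 1) =
      ((idxsOf this_ nums).map (fun i : Nat => (i : Int))).headD 0 := by
    rw [lensScan_eq_headD,
      show PySem.List.pyRange 0 (nums.length : Int) 1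
        = PySem.List.pyRange 0 (nums.length : Int) from rfl,
      PySem.List.pyRange_zero_natCast, base_filter]
  have hl : lensScan nums this_ (PySem.List.pyRange ((nums.length : Int) - 1) (-1) (-1)) =
      ((idxsOf this_ nums).map (fun i : Nat => (i : Int))).getLastD 0 := by
    rw [lensScan_eq_headD, pyRange_desc, List.filter_reverse, base_filter, headD_reverse]
  have halt : lens_alt nums this_ =
      (match (idxsOf this_ nums).map (fun i : Nat => (i : Int)) with
       | [] => (1 : Int)
       | h :: t => (h :: t).getLast (by simp) - h + 1) := by
    show (match ((nums.zipIdx).filter (fun p => p.1 == this_)).map (fun p => ((p.2 : Nat) : Int)) with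
      | [] => (1 : Int)
      | h :: t => (h :: t).getLast (by simp) - h + 1) = _
    rw [show nums.zipIdx = nums.zipIdx 0 from rfl, zipIdx_filter_eq_idxsOf]
    simp
  show lensScan nums this_ (PySem.List.pyRange ((nums.length : Int) - 1) (-1) (-1)) -
    lensScan nums this_ (PySem.List.pyRange 0 (nums.length : Int) 1) + 1 = lens_alt nums this_
  rw [hf, hl, halt]
  rcases (idxsOf this_ nums).map (fun i : Nat => (i : Int)) with _ | ⟨h, tl⟩
  · rfl
  · simp [List.getLastD]
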